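-- pv_equiv track=rewrite | github.com/ugene123/AdventOfCode | 2020/day04/day4.py | getPasswords
-- ===== SOURCE A (Python) =====
-- def getPasswords(rows: list):
--   psswrds = []
--   start = 0
--   for i, row in enumerate(rows):
--     if row == '\n':
--       psswrd = getPassword(rows, start, i-1)
--       psswrds.append(psswrd)
--       start = i + 1
--   return psswrds
--
-- def getPassword(rows, start, end):
--   psswrd = ""
--   for i in range(start, end + 1):
--     psswrd += ' ' + rows[i].replace('\n', ' ')
--   return psswrd
-- ===== SOURCE B (Python) =====
-- def getPasswords(rows: list):
--     out = []
--     cur = ""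
--     for row in rows:
--         if row == '\n':
--             out.append(cur)   # flush current block (empty block -> ''); trailing block after last '\n' is dropped, as in A
--             cur = ""
--         else:
--             cur += ' ' + row.replace('\n', ' ')
--     return out
-- ===== Notes on version B (the rewrite author's own statement) =====
-- stated objective: simpler
-- what changed: Single streaming pass that accumulates the current block in a string flushed at each '\n' row, removing the getPassword helper and its index-range re-scan.
import Mathlib
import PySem

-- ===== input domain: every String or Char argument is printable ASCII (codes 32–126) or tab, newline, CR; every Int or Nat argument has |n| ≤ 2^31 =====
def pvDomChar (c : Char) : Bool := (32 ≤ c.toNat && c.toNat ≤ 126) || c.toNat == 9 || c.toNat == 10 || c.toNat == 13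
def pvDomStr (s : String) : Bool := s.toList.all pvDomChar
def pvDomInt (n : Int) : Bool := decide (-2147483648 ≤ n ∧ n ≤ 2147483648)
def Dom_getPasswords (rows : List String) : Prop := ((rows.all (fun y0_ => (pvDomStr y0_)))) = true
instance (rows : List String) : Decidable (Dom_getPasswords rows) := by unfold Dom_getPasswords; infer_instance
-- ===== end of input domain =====

-- B replaces A's boundary-index + range re-scan (helper getPassword) with one streaming pass
-- that accumulates the current block string and flushes it at each '\n' row ("simpler").

-- ===== PORT A =====
-- rows[i] is always in range at A's call sites (0 ≤ start ≤ i ≤ end < len rows), so pyGetD's default is never used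
def getPassword (rows : List String) (start fin : Int) : String :=
  (PySem.List.pyRange start (fin + 1) 1).foldl
    (fun psswrd i => psswrd ++ " " ++ PySem.Str.replace (PySem.List.pyGetD rows i "") "\n" " ") ""

-- the enumerate loop of A, with i carried as the Int counter n
def getPasswordsGo (rows : List String) : List String → Int → List String → Int → List String
  | [], _, psswrds, _ => psswrds
  | row :: rest, n, psswrds, start =>
    if row = "\n" then
      getPasswordsGo rows rest (n + 1) (psswrds ++ [getPassword rows start (n - 1)]) (n + 1)
    else
      getPasswordsGo rows rest (n + 1) psswrds start

def getPasswords (rows : List String) : List String :=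
  getPasswordsGo rows rows 0 [] 0

-- ===== PORT B =====
def getPasswordsAltGo : List String → List String → String → List String
  | [], out, _ => out
  | row :: rest, out, cur =>
    if row = "\n" then getPasswordsAltGo rest (out ++ [cur]) ""
    else getPasswordsAltGo rest out (cur ++ " " ++ PySem.Str.replace row "\n" " ")

def getPasswords_alt (rows : List String) : List String :=
  getPasswordsAltGo rows [] ""

-- ===== PRECONDITION & SPEC =====
def Spec_getPasswords (rows : List String) (out : List String) : Prop := out = getPasswords_alt rows
instance (rows : List String) (out : List String) : Decidable (Spec_getPasswords rows out) := by unfold Spec_getPasswords; infer_instance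

-- ===== CLAIM (what is proved, stated in full; the proofs are below) =====
def Claim_equal_getPasswords : Prop := ∀ (rows : List String), Dom_getPasswords rows → Spec_getPasswords rows (getPasswords rows)

-- ===== LEMMAS AND PROOFS =====

-- the empty range start..start-1 yields the empty block
lemma getPassword_empty (rows : List String) (s : Int) : getPassword rows s (s - 1) = "" := by
  unfold getPassword
  rw [show s - 1 + 1 = s by omega, PySem.List.pyRange_one_eq_nil le_rfl]
  rfl

-- extending A's block by one more row
lemma getPassword_snoc (rows : List String) (start n : Int) (h : start ≤ n) :
    getPassword rows start n
      = getPassword rows start (n - 1) ++ " "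
          ++ PySem.Str.replace (PySem.List.pyGetD rows n "") "\n" " " := by
  unfold getPassword
  rw [show n - 1 + 1 = n by omega,
      PySem.List.pyRange_one_succ_right h, List.foldl_append]
  rfl

-- loop invariant: B's accumulator equals A's block rows[start..n-1]
lemma go_eq (rows : List String) : ∀ (rest : List String) (n start : Int) (ps : List String),
    rows.drop n.toNat = rest → 0 ≤ start → start ≤ n →
    getPasswordsGo rows rest n ps start
      = getPasswordsAltGo rest ps (getPassword rows start (n - 1)) := by
  intro rest
  induction rest with
  | nil => intro n start ps _ _ _; rfl
  | cons row rs ih =>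
    intro n start ps hdrop hs hsn
    have hn : 0 ≤ n := le_trans hs hsn
    have hlt : n.toNat < rows.length := by
      by_contra hge
      simp [List.drop_eq_nil_of_le (le_of_not_gt hge)] at hdrop
    have hcons := List.drop_eq_getElem_cons (l := rows) (i := n.toNat) hlt
    rw [hdrop] at hcons
    injection hcons with h1 h2
    have hrow : rows[n.toNat] = row := h1.symm
    have hdrop' : rows.drop (n + 1).toNat = rs := by
      rw [show (n + 1).toNat = n.toNat + 1 by omega]
      exact h2.symm
    unfold getPasswordsGo getPasswordsAltGo
    by_cases hv : row = "\n"
    · rw [if_pos hv, if_pos hv]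
      rw [ih (n + 1) (n + 1) _ hdrop' (by omega) le_rfl]
      rw [show n + 1 - 1 = n by omega]
      rw [show getPassword rows (n + 1) n = "" from by
        have := getPassword_empty rows (n + 1); rwa [show n + 1 - 1 = n by omega] at this]
    · rw [if_neg hv, if_neg hv]
      rw [ih (n + 1) start _ hdrop' hs (by omega)]
      rw [show n + 1 - 1 = n by omega, getPassword_snoc rows start n hsn]
      have : PySem.List.pyGetD rows n "" = row := by
        rw [PySem.List.pyGetD_eq_getElem rows "" hn (by omega)]; exact hrow
      rw [this]

-- ===== VERDICT (by name: the statement is the Claim_ definition above) =====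
theorem getPasswords_spec : Claim_equal_getPasswords := by
  intro rows _
  show getPasswords rows = getPasswords_alt rows
  unfold getPasswords getPasswords_alt
  rw [go_eq rows rows 0 0 [] (by simp) le_rfl le_rfl]
  rw [show (0 : Int) - 1 = 0 - 1 by rfl]
  rw [show getPassword rows 0 (0 - 1) = "" from getPassword_empty rows 0]
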